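-- pv_equiv track=rewrite | github.com/pypi-data/pypi-mirror-1 | packages/Pocoo/Pocoo-0.1.5.tar.gz/Pocoo-0.1.5/scripts/generate_pot.py | gettext_quote
-- ===== SOURCE A (Python) =====
-- def gettext_quote(s):
--     result = ['"']
--     firstmatch = True
--     for char in s:
--         if char == '\n':
--             if firstmatch:
--                 result = ['""\n'] + result
--                 firstmatch = False
--             result += ['\\n"\n"']
--             continue
--         if char in '\t"':
--             result.append('\\')
--         result.append(char)
--     result.append('"')
--     return ''.join(result)
-- ===== SOURCE B (Python) =====
-- def gettext_quote(s):
--     body = s.replace('"', '\\"').replace('\t', '\\\t').replace('\n', '\\n"\n"')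
--     prefix = '""\n' if '\n' in s else ''
--     return prefix + '"' + body + '"'
-- ===== Notes on version B (the rewrite author's own statement) =====
-- stated objective: idiomatic
-- what changed: Replaces the char-by-char accumulation loop with a first-match flag by three chained full-string str.replace passes (quote, tab, then newline last) plus one substring membership test for the empty-msgid prefix line.
import Mathlib
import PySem

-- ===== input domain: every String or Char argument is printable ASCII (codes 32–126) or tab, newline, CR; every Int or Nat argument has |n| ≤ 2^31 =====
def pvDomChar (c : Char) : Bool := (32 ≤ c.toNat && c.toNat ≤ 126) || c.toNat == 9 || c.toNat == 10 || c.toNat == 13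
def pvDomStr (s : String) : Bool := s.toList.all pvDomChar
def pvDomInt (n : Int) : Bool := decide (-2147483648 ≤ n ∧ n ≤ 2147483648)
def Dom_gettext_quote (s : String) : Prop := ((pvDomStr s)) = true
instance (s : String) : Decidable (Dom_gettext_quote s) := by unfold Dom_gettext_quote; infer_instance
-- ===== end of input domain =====

-- B escapes with three chained str.replace passes instead of A's conditional per-character loop.

-- ===== PORT A =====
-- one loop step of A: the body of 'for char in s' over the state (result, firstmatch)
def gqStep (st : List String × Bool) (char : Char) : List String × Bool :=
  if char = '\n' then
    let st1 := if st.2 then ("\"\"\n" :: st.1, false) else st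
    (st1.1 ++ ["\\n\"\n\""], st1.2)
  else
    ((if char = '\t' ∨ char = '"' then st.1 ++ ["\\"] else st.1) ++ [String.ofList [char]], st.2)

def gettext_quote (s : String) : String :=
  let fin := s.toList.foldl gqStep (["\""], true)
  PySem.Str.join "" (fin.1 ++ ["\""])

-- ===== PORT B =====
def gettext_quote_alt (s : String) : String :=
  let body := PySem.Str.replace (PySem.Str.replace (PySem.Str.replace s "\"" "\\\"") "\t" "\\\t") "\n" "\\n\"\n\""
  let pre := if PySem.Str.isIn "\n" s then "\"\"\n" else ""
  pre ++ "\"" ++ body ++ "\""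

-- ===== PRECONDITION & SPEC =====
def Spec_gettext_quote (s : String) (out : String) : Prop := out = gettext_quote_alt s
instance (s : String) (out : String) : Decidable (Spec_gettext_quote s out) := by unfold Spec_gettext_quote; infer_instance

-- ===== CLAIM (what is proved, stated in full; the proofs are below) =====
def Claim_equal_gettext_quote : Prop := ∀ (s : String), Dom_gettext_quote s → Spec_gettext_quote s (gettext_quote s)

-- ===== LEMMAS AND PROOFS =====

-- the combined per-character escape both programs realise
def gqEsc (c : Char) : List Char :=
  if c = '\n' then ['\\', 'n', '"', '\n', '"']
  else if c = '\t' ∨ c = '"' then ['\\', c] else [c]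

def gqStrcat (rs : List String) : List Char := (rs.map String.toList).flatten

theorem gq_join_empty (rs : List String) : (PySem.Str.join "" rs).toList = gqStrcat rs := by
  rw [PySem.Str.toList_join]
  show PySem.Chars.join [] (rs.map String.toList) = gqStrcat rs
  induction rs with
  | nil => simp [PySem.Chars.join_nil, gqStrcat]
  | cons p rest ih =>
    cases rest with
    | nil => simp [PySem.Chars.join_singleton, gqStrcat]
    | cons q r =>
      rw [List.map_cons, List.map_cons, PySem.Chars.join_cons_cons, ← List.map_cons]
      rw [ih]
      simp [gqStrcat]

theorem gq_go_single (o : Char) (new : List Char) :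
    ∀ (l : List Char) (fuel : Nat) (acc : List Char), l.length ≤ fuel →
      PySem.Chars.replace.go [o] new fuel l acc
        = acc.reverse ++ l.flatMap (fun c => if c = o then new else [c]) := by
  intro l
  induction l with
  | nil =>
    intro fuel acc _
    cases fuel <;> simp [PySem.Chars.replace.go]
  | cons c t ih =>
    intro fuel acc hle
    cases fuel with
    | zero => simp at hle
    | succ f =>
      by_cases h : c = o
      · subst h
        have hstep : PySem.Chars.replace.go [c] new (f + 1) (c :: t) acc
            = PySem.Chars.replace.go [c] new f t (new.reverse ++ acc) := by
          simp [PySem.Chars.replace.go, List.isPrefixOf]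
        rw [hstep, ih f (new.reverse ++ acc) (by simpa using hle)]
        simp
      · have hpre : [o].isPrefixOf (c :: t) = false := by
          simp only [List.isPrefixOf, Bool.and_true, beq_eq_false_iff_ne, ne_eq]
          exact fun hh => absurd hh.symm h
        have hstep : PySem.Chars.replace.go [o] new (f + 1) (c :: t) acc
            = PySem.Chars.replace.go [o] new f t (c :: acc) := by
          simp [PySem.Chars.replace.go, hpre]
        rw [hstep, ih f (c :: acc) (by simpa using hle)]
        simp [h]

theorem gq_replace_single (cs : List Char) (o : Char) (new : List Char) :
    PySem.Chars.replace cs [o] new = cs.flatMap (fun c => if c = o then new else [c]) := by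
  rw [PySem.Chars.replace]
  simp only [List.isEmpty_cons, Bool.false_eq_true, if_false]
  simpa using gq_go_single o new cs (cs.length) [] le_rfl

theorem gq_singleton_infix (a : Char) (l : List Char) : [a] <:+: l ↔ a ∈ l := by
  constructor
  · intro h
    exact List.singleton_sublist.mp h.sublist
  · intro h
    obtain ⟨s, t, rfl⟩ := List.append_of_mem h
    exact ⟨s, t, by simp⟩

theorem gq_fold_inv (l : List Char) : ∀ (res : List String) (fm : Bool),
    gqStrcat (l.foldl gqStep (res, fm)).1
      = (if fm = true ∧ '\n' ∈ l then ('"' :: '"' :: '\n' :: []) else [])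
          ++ gqStrcat res ++ l.flatMap gqEsc := by
  induction l with
  | nil => intro res fm; simp
  | cons c t ih =>
    intro res fm
    by_cases hc : c = '\n'
    · subst hc
      cases fm with
      | true =>
        have hst : gqStep (res, true) '\n' = ("\"\"\n" :: res ++ ["\\n\"\n\""], false) := by
          simp [gqStep]
        rw [List.foldl_cons, hst, ih]
        simp [gqStrcat, gqEsc]
      | false =>
        have hst : gqStep (res, false) '\n' = (res ++ ["\\n\"\n\""], false) := by
          simp [gqStep]
        rw [List.foldl_cons, hst, ih]
        simp [gqStrcat, gqEsc]
    · have hst : gqStep (res, fm) c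
          = ((if c = '\t' ∨ c = '"' then res ++ ["\\"] else res) ++ [String.ofList [c]], fm) := by
        simp [gqStep, hc]
      rw [List.foldl_cons, hst, ih]
      have hne : ¬ ('\n' = c) := fun hh => hc hh.symm
      have hmem : ('\n' ∈ c :: t) ↔ ('\n' ∈ t) := by
        rw [List.mem_cons]; simp [hne]
      by_cases he : c = '\t' ∨ c = '"'
      · simp [he, gqStrcat, gqEsc, hc, hmem]
      · simp [he, gqStrcat, gqEsc, hc, hmem]

theorem gq_A_toList (s : String) :
    (gettext_quote s).toList
      = (if '\n' ∈ s.toList then ('"' :: '"' :: '\n' :: []) else [])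
          ++ '"' :: (s.toList.flatMap gqEsc ++ ['"']) := by
  show (PySem.Str.join "" ((s.toList.foldl gqStep (["\""], true)).1 ++ ["\""])).toList = _
  rw [gq_join_empty]
  have : gqStrcat ((s.toList.foldl gqStep (["\""], true)).1 ++ ["\""])
      = gqStrcat (s.toList.foldl gqStep (["\""], true)).1 ++ ['"'] := by
    simp [gqStrcat]
  rw [this, gq_fold_inv]
  by_cases h : '\n' ∈ s.toList <;> simp [h, gqStrcat]

theorem gq_B_toList (s : String) :
    (gettext_quote_alt s).toList
      = (if '\n' ∈ s.toList then ('"' :: '"' :: '\n' :: []) else [])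
          ++ '"' :: (s.toList.flatMap gqEsc ++ ['"']) := by
  show ((if PySem.Str.isIn "\n" s then "\"\"\n" else "") ++ "\"" ++ _ ++ "\"").toList = _
  have hmem : PySem.Str.isIn "\n" s = true ↔ '\n' ∈ s.toList := by
    rw [PySem.Str.isIn_iff_infix]
    exact gq_singleton_infix '\n' s.toList
  rw [String.toList_append, String.toList_append, String.toList_append]
  rw [PySem.Str.toList_replace, PySem.Str.toList_replace, PySem.Str.toList_replace]
  have e1 : ("\"" : String).toList = ['\"'] := rfl
  have e2 : ("\t" : String).toList = ['\t'] := rfl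
  have e3 : ("\n" : String).toList = ['\n'] := rfl
  rw [e1, e2, e3]
  rw [gq_replace_single, gq_replace_single, gq_replace_single]
  rw [List.flatMap_assoc, List.flatMap_assoc]
  have hbody : ∀ c : Char,
      List.flatMap
          (fun x => List.flatMap (fun d => if d = '\n' then ("\\n\"\n\"" : String).toList else [d])
            (if x = '\t' then ("\\\t" : String).toList else [x]))
          (if c = '\"' then ("\\\"" : String).toList else [c]) = gqEsc c := by
    intro c
    by_cases h1 : c = '\"'
    · simp [h1, gqEsc]
    · by_cases h2 : c = '\t'
      · simp [h2, gqEsc]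
      · by_cases h3 : c = '\n'
        · simp [h3, gqEsc]
        · simp [h1, h2, h3, gqEsc]
  rw [List.flatMap_congr (fun c _ => hbody c)]
  by_cases h : '\n' ∈ s.toList
  · rw [if_pos (hmem.mpr h), if_pos h]; simp
  · rw [if_neg (fun hh => h (hmem.mp hh)), if_neg h]; simp

-- ===== VERDICT (by name: the statement is the Claim_ definition above) =====
theorem gettext_quote_spec : Claim_equal_gettext_quote := by
  intro s _
  show gettext_quote s = gettext_quote_alt s
  exact String.toList_inj.mp ((gq_A_toList s).trans (gq_B_toList s).symm)
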